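-- pv_equiv track=rewrite | github.com/Jinwon777777/This_is_CodingTest | 13-4.py | get_through
-- ===== SOURCE A (Python) =====
-- def verify(s):
--     count = 0
--     for com in s:
--         if com == '(':
--             count+=1
--         elif com == ')':
--             count -= 1
--         if count < 0:
--             return False
--     return True
--
-- def divide(s):
--     ind = 0
--     count = 0
--     for com in s:
--         if com == '(':
--             count += 1
--         elif com == ')':
--             count -= 1
--         if count == 0:
--             return ind
--         ind += 1
--
-- def get_through(s):
--     if s == '':
--         return ''
--     u = s[:divide(s)+1]
--     v = s[divide(s)+1:]
--     if verify(u):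
--         return u+get_through(v)
--     else:
--         new = '(' + get_through(v) + ')'
--         u = u[1:-1]
--         t = ''
--         for item in u:
--             if item == '(':
--                 t += ')'
--             elif item == ')':
--                 t += '('
--         return new+t
-- ===== SOURCE B (Python) =====
-- def get_through(s):
--     out = []
--     tails = []
--     bal = 0
--     cur = []
--     bad = False
--     for c in s:
--         cur.append(c)
--         if c == '(':
--             bal += 1
--         elif c == ')':
--             bal -= 1
--         if bal < 0:
--             bad = True
--         if bal == 0:
--             if bad:
--                 out.append('(')
--                 tails.append(')' + ''.join('(' if ch == ')' else ')'
--                                            for ch in cur[1:-1] if ch in '()'))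
--             else:
--                 out.append(''.join(cur))
--             cur = []
--             bad = False
--     out.extend(reversed(tails))
--     return ''.join(out)
-- ===== Notes on version B (the rewrite author's own statement) =====
-- stated objective: faster
-- what changed: A's recursion, which rescans each remaining suffix with divide twice and verify and reslices it at every level, is replaced by a single left-to-right pass with one balance counter that flushes each balanced chunk as it closes, pushing the wrapped suffixes of unbalanced-prefix chunks on a stack that is appended in reverse at the end.
-- outside the precondition, e.g. on get_through('('): A raises TypeError, B returns ''; on get_through(')'): A raises TypeError, B returns ''
import Mathlib
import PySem

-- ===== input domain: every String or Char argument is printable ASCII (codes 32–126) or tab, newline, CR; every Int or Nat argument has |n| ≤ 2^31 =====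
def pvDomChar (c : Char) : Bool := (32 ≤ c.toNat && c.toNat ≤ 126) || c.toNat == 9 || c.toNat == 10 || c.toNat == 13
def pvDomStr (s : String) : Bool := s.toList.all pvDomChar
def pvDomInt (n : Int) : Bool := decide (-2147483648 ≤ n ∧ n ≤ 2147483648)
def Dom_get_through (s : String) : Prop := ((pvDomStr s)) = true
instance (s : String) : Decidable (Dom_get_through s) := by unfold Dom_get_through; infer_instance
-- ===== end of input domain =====

-- B replaces A's recursion (which rescans with divide/verify and reslices at every level, O(n^2))
-- by one left-to-right pass with a balance counter and a stack of pending suffixes, O(n).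

-- ===== PORT A =====

-- verify(s): count never drops below 0 (early return False)
def pvVerifyLoop : Int → List Char → Bool
  | _, [] => true
  | count, com :: rest =>
    let count := if com = '(' then count + 1 else if com = ')' then count - 1 else count
    if count < 0 then false else pvVerifyLoop count rest

def pvVerify (s : List Char) : Bool := pvVerifyLoop 0 s

-- divide(s): index of first position where the running count is 0 (none = falls off the loop,
-- Python then raises TypeError on divide(s)+1)
def pvDivideLoop : Nat → Int → List Char → Option Nat
  | _, _, [] => none
  | ind, count, com :: rest =>
    let count := if com = '(' then count + 1 else if com = ')' then count - 1 else count
    if count = 0 then some ind else pvDivideLoop (ind + 1) count rest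

def pvDivide (s : List Char) : Option Nat := pvDivideLoop 0 0 s

-- the `for item in u: t += …` loop of A's else branch
def pvFlipA : List Char → List Char
  | [] => []
  | item :: rest =>
    if item = '(' then ')' :: pvFlipA rest
    else if item = ')' then '(' :: pvFlipA rest
    else pvFlipA rest

def pvGetThroughA : List Char → List Char
  | [] => []
  | a :: l =>
    match h : pvDivide (a :: l) with
    | none => []   -- Python raises TypeError here; excluded by Pre_get_through
    | some d =>
      let u := (a :: l).take (d + 1)           -- s[:divide(s)+1]
      let v := (a :: l).drop (d + 1)           -- s[divide(s)+1:]
      if pvVerify u then u ++ pvGetThroughA v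
      else '(' :: (pvGetThroughA v ++ ')' :: pvFlipA (u.drop 1).dropLast)   -- u[1:-1]
termination_by l => l.length
decreasing_by
  all_goals simp

def get_through (s : String) : String := String.mk (pvGetThroughA s.toList)

-- ===== PORT B =====

structure PvBSt where
  out   : List (List Char)
  tails : List (List Char)
  bal   : Int
  cur   : List Char
  bad   : Bool
deriving Repr, DecidableEq

-- ''.join('(' if ch == ')' else ')' for ch in cur[1:-1] if ch in '()')
def pvFlipB (cur : List Char) : List Char :=
  (((cur.drop 1).dropLast.filter (fun ch => ch = '(' || ch = ')')).map
    (fun ch => if ch = ')' then '(' else ')'))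

def pvStepB (st : PvBSt) (c : Char) : PvBSt :=
  let cur := st.cur ++ [c]
  let bal := if c = '(' then st.bal + 1 else if c = ')' then st.bal - 1 else st.bal
  let bad := if bal < 0 then true else st.bad
  if bal = 0 then
    if bad then
      { out := st.out ++ [['(']], tails := st.tails ++ [')' :: pvFlipB cur],
        bal := 0, cur := [], bad := false }
    else
      { out := st.out ++ [cur], tails := st.tails, bal := 0, cur := [], bad := false }
  else
    { out := st.out, tails := st.tails, bal := bal, cur := cur, bad := bad }

def pvGetThroughB (l : List Char) : List Char :=
  let st := l.foldl pvStepB ⟨[], [], 0, [], false⟩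
  (st.out ++ st.tails.reverse).flatten          -- out.extend(reversed(tails)); ''.join(out)

def get_through_alt (s : String) : String := String.mk (pvGetThroughB s.toList)

-- ===== PRECONDITION & SPEC =====
-- Pre_ excludes exactly the strings with unequal '(' / ')' counts, on which Python A raises
-- TypeError (divide returns None and A computes divide(s)+1).
def Pre_get_through (s : String) : Prop := s.toList.count '(' = s.toList.count ')'
instance (s : String) : Decidable (Pre_get_through s) := by unfold Pre_get_through; infer_instance

def pvWitness_get_through : String := "(()))("

def Spec_get_through (s : String) (out : String) : Prop := out = get_through_alt s
instance (s : String) (out : String) : Decidable (Spec_get_through s out) := by unfold Spec_get_through; infer_instance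

-- ===== CLAIM (what is proved, stated in full; the proofs are below) =====
def Claim_equal_get_through : Prop := ∀ (s : String), Dom_get_through s → Pre_get_through s → Spec_get_through s (get_through s)

-- ===== LEMMAS AND PROOFS =====

-- running balance after one character
def pvBStep (b : Int) (c : Char) : Int := if c = '(' then b + 1 else if c = ')' then b - 1 else b

-- balance after a whole prefix
def pvBal (b : Int) (l : List Char) : Int := l.foldl pvBStep b

-- every intermediate balance (after ≥1 chars of l) is nonzero
def pvNoZero (b : Int) : List Char → Bool
  | [] => true
  | c :: l => (pvBStep b c ≠ 0) && pvNoZero (pvBStep b c) l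

-- some intermediate balance is negative
def pvAnyNeg (b : Int) : List Char → Bool
  | [] => false
  | c :: l => (decide (pvBStep b c < 0)) || pvAnyNeg (pvBStep b c) l

theorem pvBal_append (b : Int) (l₁ l₂ : List Char) :
    pvBal b (l₁ ++ l₂) = pvBal (pvBal b l₁) l₂ := by
  simp [pvBal, List.foldl_append]

theorem pvBal_count (l : List Char) : ∀ b : Int,
    pvBal b l = b + l.count '(' - l.count ')' := by
  induction l with
  | nil => intro b; simp [pvBal]
  | cons c l ih =>
    intro b
    simp only [pvBal, List.foldl_cons] at *
    rw [ih (pvBStep b c)]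
    by_cases h1 : c = '(' <;> by_cases h2 : c = ')' <;>
      simp [pvBStep, h1, h2, List.count_cons] <;> omega

theorem pvVerifyLoop_eq (l : List Char) : ∀ b, pvVerifyLoop b l = !pvAnyNeg b l := by
  induction l with
  | nil => intro b; simp [pvVerifyLoop, pvAnyNeg]
  | cons c l ih =>
    intro b
    simp only [pvVerifyLoop, pvAnyNeg]
    by_cases h : pvBStep b c < 0
    · simp [pvBStep] at h ⊢
      split_ifs <;> simp_all <;> omega
    · simp [pvBStep] at h ⊢
      split_ifs <;> simp_all [ih] <;> omega

theorem pvAnyNeg_last (b : Int) (w : List Char) (c : Char) (h : ¬ pvBStep (pvBal b w) c < 0) :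
    pvAnyNeg b (w ++ [c]) = pvAnyNeg b w := by
  induction w generalizing b with
  | nil => simp [pvAnyNeg, pvBal] at h ⊢; omega
  | cons a w ih =>
    simp only [List.cons_append, pvAnyNeg]
    rw [ih (pvBStep b a) (by simpa [pvBal] using h)]

-- the first chunk: a nonempty prefix whose running balance is nonzero strictly inside and 0 at its end
theorem pvChunk_exists (l : List Char) : ∀ b, l ≠ [] → pvBal b l = 0 →
    ∃ w c v, l = w ++ c :: v ∧ pvNoZero b w = true ∧ pvBStep (pvBal b w) c = 0 := by
  induction l with
  | nil => intro b h; exact absurd rfl h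
  | cons a l ih =>
    intro b _ hbal
    by_cases h0 : pvBStep b a = 0
    · exact ⟨[], a, l, rfl, rfl, by simpa [pvBal] using h0⟩
    · have hl : l ≠ [] := by
        rintro rfl; simp [pvBal, List.foldl] at hbal; exact h0 hbal
      have hbal' : pvBal (pvBStep b a) l = 0 := by simpa [pvBal] using hbal
      obtain ⟨w, c, v, hw, hnz, hc⟩ := ih (pvBStep b a) hl hbal'
      refine ⟨a :: w, c, v, by simp [hw], ?_, ?_⟩
      · simp [pvNoZero, h0, hnz]
      · simpa [pvBal] using hc

theorem pvDivideLoop_chunk (w : List Char) : ∀ ind b c v, pvNoZero b w = true →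
    pvBStep (pvBal b w) c = 0 →
    pvDivideLoop ind b (w ++ c :: v) = some (ind + w.length) := by
  induction w with
  | nil =>
    intro ind b c v _ hc
    simp [pvBal] at hc
    simp [pvDivideLoop, pvBStep] at hc ⊢
    split_ifs with h1 h2 <;> simp_all [pvBStep] <;> omega
  | cons a w ih =>
    intro ind b c v hnz hc
    simp only [pvNoZero, Bool.and_eq_true, decide_eq_true_eq] at hnz
    obtain ⟨ha, hw⟩ := hnz
    simp only [List.cons_append, pvDivideLoop]
    have : ¬ (if a = '(' then b + 1 else if a = ')' then b - 1 else b) = 0 := by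
      simpa [pvBStep] using (by simpa using ha)
    rw [if_neg this]
    have := ih (ind + 1) (pvBStep b a) c v hw (by simpa [pvBal] using hc)
    simpa [pvBStep, Nat.add_assoc, Nat.add_comm 1 w.length] using this

theorem pvTake_append_len (w t : List Char) (n : Nat) :
    (w ++ t).take (w.length + n) = w ++ t.take n := by
  simp [List.take_append]

theorem pvDrop_append_len (w t : List Char) (n : Nat) :
    (w ++ t).drop (w.length + n) = t.drop n := by
  simp [List.drop_append]

-- running pvStepB through a zero-free stretch only accumulates cur/bal/bad
theorem pvFold_noZero (w : List Char) : ∀ out tails b cur bad, pvNoZero b w = true →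
    List.foldl pvStepB ⟨out, tails, b, cur, bad⟩ w =
      ⟨out, tails, pvBal b w, cur ++ w, bad || pvAnyNeg b w⟩ := by
  induction w with
  | nil => intro out tails b cur bad _; simp [pvBal, pvAnyNeg]
  | cons c w ih =>
    intro out tails b cur bad hnz
    simp only [pvNoZero, Bool.and_eq_true, decide_eq_true_eq] at hnz
    obtain ⟨hc, hw⟩ := hnz
    simp only [List.foldl_cons]
    have hstep : pvStepB ⟨out, tails, b, cur, bad⟩ c =
        ⟨out, tails, pvBStep b c, cur ++ [c], bad || decide (pvBStep b c < 0)⟩ := by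
      simp only [pvStepB, pvBStep] at hc ⊢
      rw [if_neg hc]
      by_cases h : (if c = '(' then b + 1 else if c = ')' then b - 1 else b) < 0 <;>
        simp [h]
    rw [hstep, ih _ _ _ _ _ hw]
    simp [pvBal, pvAnyNeg, pvBStep, Bool.or_assoc, List.append_assoc]

-- out/tails prefixes pass through the fold unchanged
theorem pvFold_frame (v : List Char) : ∀ out0 tails0 out tails b cur bad,
    List.foldl pvStepB ⟨out0 ++ out, tails0 ++ tails, b, cur, bad⟩ v =
      (let st := List.foldl pvStepB ⟨out, tails, b, cur, bad⟩ v
       ⟨out0 ++ st.out, tails0 ++ st.tails, st.bal, st.cur, st.bad⟩) := by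
  induction v with
  | nil => intro out0 tails0 out tails b cur bad; simp
  | cons c v ih =>
    intro out0 tails0 out tails b cur bad
    simp only [List.foldl_cons]
    have : pvStepB ⟨out0 ++ out, tails0 ++ tails, b, cur, bad⟩ c =
        (let st := pvStepB ⟨out, tails, b, cur, bad⟩ c
         ⟨out0 ++ st.out, tails0 ++ st.tails, st.bal, st.cur, st.bad⟩) := by
      simp only [pvStepB]
      split_ifs <;> simp [List.append_assoc]
    rw [this]
    simp only []
    rw [ih]

theorem pvFlip_eq (x : List Char) : pvFlipA x =
    (x.filter (fun ch => ch = '(' || ch = ')')).map (fun ch => if ch = ')' then '(' else ')') := by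
  induction x with
  | nil => rfl
  | cons c x ih =>
    by_cases h1 : c = '(' <;> by_cases h2 : c = ')' <;>
      simp [pvFlipA, h1, h2, ih, List.filter_cons]

theorem pvMain (n : Nat) : ∀ l : List Char, l.length ≤ n → pvBal 0 l = 0 →
    pvGetThroughA l = pvGetThroughB l := by
  induction n with
  | zero =>
    intro l hlen _
    have : l = [] := List.length_eq_zero_iff.mp (Nat.le_zero.mp hlen)
    subst this; simp [pvGetThroughA, pvGetThroughB]
  | succ n ih =>
    intro l hlen hbal
    match l with
    | [] => simp [pvGetThroughA, pvGetThroughB]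
    | a :: l' =>
      obtain ⟨w, c, v, hdec, hnz, hc⟩ := pvChunk_exists (a :: l') 0 (by simp) hbal
      have hdiv : pvDivide (a :: l') = some w.length := by
        rw [hdec]; unfold pvDivide
        simpa using pvDivideLoop_chunk w 0 0 c v hnz hc
      have hu : (a :: l').take (w.length + 1) = w ++ [c] := by
        rw [hdec, pvTake_append_len]; rfl
      have hv : (a :: l').drop (w.length + 1) = v := by
        rw [hdec, pvDrop_append_len]; rfl
      have hvbal : pvBal 0 v = 0 := by
        have : pvBal 0 (a :: l') = pvBal (pvBStep (pvBal 0 w) c) v := by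
          rw [hdec, pvBal_append]; simp [pvBal]
        rw [this, hc] at hbal; exact hbal
      have hvlen : v.length ≤ n := by
        have h2 := congrArg List.length hdec
        simp only [List.length_cons, List.length_append] at h2 hlen
        omega
      have ihv := ih v hvlen hvbal
      -- verify (w ++ [c]) = ! pvAnyNeg 0 w
      have hcnn : ¬ pvBStep (pvBal 0 w) c < 0 := by rw [hc]; omega
      have hverify : pvVerify (w ++ [c]) = !pvAnyNeg 0 w := by
        rw [pvVerify, pvVerifyLoop_eq, pvAnyNeg_last 0 w c hcnn]
      -- B side: fold over the chunk, then flush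
      have hflushbal : (if c = '(' then pvBal 0 w + 1 else if c = ')' then pvBal 0 w - 1 else pvBal 0 w) = 0 := by
        simpa [pvBStep] using hc
      have hfold1 : List.foldl pvStepB ⟨[], [], 0, [], false⟩ (w ++ c :: v) =
          List.foldl pvStepB (pvStepB ⟨[], [], pvBal 0 w, w, pvAnyNeg 0 w⟩ c) v := by
        have hsplit : w ++ c :: v = (w ++ [c]) ++ v := by simp
        rw [hsplit, List.foldl_append, List.foldl_append,
            pvFold_noZero w [] [] 0 [] false hnz]
        simp
      have hstepc : pvStepB ⟨[], [], pvBal 0 w, w, pvAnyNeg 0 w⟩ c =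
          (if pvAnyNeg 0 w then
            ⟨[['(']], [')' :: pvFlipB (w ++ [c])], 0, [], false⟩
          else ⟨[w ++ [c]], [], 0, [], false⟩) := by
        simp only [pvStepB]
        rw [if_neg (by rw [hflushbal]; omega : ¬ (if c = '(' then pvBal 0 w + 1 else if c = ')' then pvBal 0 w - 1 else pvBal 0 w) < 0)]
        rw [if_pos hflushbal]
        cases pvAnyNeg 0 w <;> simp
      -- assemble both sides
      unfold pvGetThroughA
      rw [hdiv]
      simp only [hu, hv, hverify]
      unfold pvGetThroughB
      rw [hdec, hfold1, hstepc]
      cases hb : pvAnyNeg 0 w with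
      | false =>
        have hfr := pvFold_frame v [w ++ [c]] [] [] [] 0 [] false
        simp only [List.append_nil, List.nil_append] at hfr
        simp [hfr, pvGetThroughB, ihv]
      | true =>
        have hfr := pvFold_frame v [['(']] [')' :: pvFlipB (w ++ [c])] [] [] 0 [] false
        simp only [List.append_nil, List.nil_append] at hfr
        have hflip : pvFlipA (w ++ [c]).tail.dropLast = pvFlipB (w ++ [c]) := by
          rw [pvFlip_eq, pvFlipB, List.drop_one]
        simp [hfr, pvGetThroughB, ihv, hflip, List.flatten_append]

-- ===== VERDICT (by name: the statement is the Claim_ definition above) =====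
theorem get_through_spec : Claim_equal_get_through := by
  intro s _ hpre
  unfold Spec_get_through get_through get_through_alt
  congr 1
  apply pvMain s.toList.length s.toList le_rfl
  have := pvBal_count s.toList 0
  unfold Pre_get_through at hpre
  omega
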